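-- pv_equiv track=rewrite | github.com/matteso1/ProjectGorgon | src/gorgon/data/dataset.py | make_shifted_targets
-- ===== SOURCE A (Python) =====
-- from typing import Iterator, List, Optional, Sequence, Tuple
--
-- def make_shifted_targets(tokens: List[int], max_heads: int) -> Tuple[List[int], ...]:
--     """Create shifted target sequences for each Medusa head.
--
--     Head k predicts token at position (t + k), so target for head k
--     is the input shifted forward by k positions.
--     """
--     outputs: List[List[int]] = []
--     target_length = max(len(tokens) - 1, 0)
--     for head_index in range(1, max_heads + 1):
--         shifted = tokens[head_index:]
--         pad_count = max(target_length - len(shifted), 0)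
--         outputs.append(shifted + [None] * pad_count)
--     return tuple(outputs)
-- ===== SOURCE B (Python) =====
-- def make_shifted_targets(tokens, max_heads):
--     """Create shifted target sequences for each Medusa head.
--
--     Incremental recurrence: head 1's targets are tokens[1:]; every later
--     head's targets are the previous head's with the leading element dropped
--     and one None appended (all rows share one width), so no per-head slice
--     of tokens or pad-count arithmetic is done.
--     """
--     outputs = []
--     cur = tokens[1:]
--     for _ in range(max_heads):
--         outputs.append(cur)
--         cur = cur[1:] + [None] if cur else []
--     return tuple(outputs)
-- ===== Notes on version B (the rewrite author's own statement) =====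
-- stated objective: alternative
-- what changed: Replaces per-head slicing of tokens plus per-head pad-count arithmetic with an incremental recurrence: each head's row is derived from the previous row by dropping its first element and appending one None, so tokens is sliced only once.
import Mathlib
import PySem

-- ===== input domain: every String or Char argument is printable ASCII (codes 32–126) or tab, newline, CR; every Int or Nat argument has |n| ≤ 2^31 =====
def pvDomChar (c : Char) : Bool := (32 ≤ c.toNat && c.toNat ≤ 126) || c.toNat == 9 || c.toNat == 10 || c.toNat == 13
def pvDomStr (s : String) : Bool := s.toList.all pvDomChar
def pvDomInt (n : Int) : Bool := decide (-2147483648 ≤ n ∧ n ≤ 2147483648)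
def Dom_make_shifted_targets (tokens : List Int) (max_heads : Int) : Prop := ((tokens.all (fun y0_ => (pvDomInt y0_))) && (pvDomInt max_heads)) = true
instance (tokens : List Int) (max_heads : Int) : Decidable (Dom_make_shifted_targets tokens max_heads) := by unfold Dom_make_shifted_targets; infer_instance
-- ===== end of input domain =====

-- B replaces per-head slicing+padding with an incremental row recurrence (drop head, append None); return value only — A returns a tuple.
-- ===== PORT A =====
-- A builds each head's list as tokens[head:] + [None]*pad_count, appending to outputs.
def make_shifted_targets (tokens : List Int) (max_heads : Int) : List (List (Option Int)) :=
  let target_length : Int := max ((tokens.length : Int) - 1) 0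
  (PySem.List.pyRange 1 (max_heads + 1) 1).foldl (fun outputs head_index =>
    let shifted : List (Option Int) := (PySem.List.slice tokens (some head_index) none).map some
    let pad_count : Int := max (target_length - (shifted.length : Int)) 0
    outputs ++ [shifted ++ List.replicate pad_count.toNat none]) []

-- ===== PORT B =====
-- B: start from tokens[1:]; each further row = previous row minus its head plus one None.
def msAltLoop : Nat → List (Option Int) → List (List (Option Int))
  | 0, _ => []
  | n + 1, cur => cur :: msAltLoop n (if cur.isEmpty then [] else cur.drop 1 ++ [none])

def make_shifted_targets_alt (tokens : List Int) (max_heads : Int) : List (List (Option Int)) :=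
  msAltLoop max_heads.toNat ((PySem.List.slice tokens (some 1) none).map some)

-- ===== PRECONDITION & SPEC =====
def Spec_make_shifted_targets (tokens : List Int) (max_heads : Int) (out : List (List (Option Int))) : Prop := out = make_shifted_targets_alt tokens max_heads
instance (tokens : List Int) (max_heads : Int) (out : List (List (Option Int))) : Decidable (Spec_make_shifted_targets tokens max_heads out) := by unfold Spec_make_shifted_targets; infer_instance

-- ===== CLAIM =====
def Claim_equal_make_shifted_targets : Prop := ∀ (tokens : List Int) (max_heads : Int), Dom_make_shifted_targets tokens max_heads → Spec_make_shifted_targets tokens max_heads (make_shifted_targets tokens max_heads)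

-- ===== LEMMAS AND PROOFS =====

-- The row for head k (k ≥ 1): the tail slice padded with Nones to the common width.
def pvRow (tokens : List Int) (k : Nat) : List (Option Int) :=
  (tokens.drop k).map some ++ List.replicate ((tokens.length - 1) - (tokens.length - k)) (none : Option Int)

-- One loop step of B turns row k into row (k+1).
lemma pvRow_step (tokens : List Int) (k : Nat) (hk : 1 ≤ k) :
    (if (pvRow tokens k).isEmpty then [] else (pvRow tokens k).drop 1 ++ [none]) = pvRow tokens (k + 1) := by
  set L := tokens.length with hL
  rcases Nat.lt_or_ge 1 L with hL2 | hL1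
  · -- L ≥ 2 : the row is nonempty
    rcases Nat.lt_or_ge k L with hkL | hLk
    · -- drop k nonempty
      have hne : pvRow tokens k ≠ [] := by
        simp [pvRow, ← hL]
        omega
      rw [if_neg (by simpa [List.isEmpty_iff] using hne)]
      unfold pvRow
      rw [List.drop_append_of_le_length (by simp [← hL]; omega), ← List.map_drop, List.drop_drop]
      rw [List.append_assoc, ← List.replicate_succ']
      congr 2
      omega
    · -- drop k empty, pure padding row
      have hd : tokens.drop k = [] := List.drop_eq_nil_of_le hLk
      have hd1 : tokens.drop (k + 1) = [] := List.drop_eq_nil_of_le (by omega)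
      unfold pvRow
      rw [hd, hd1]
      simp only [List.map_nil, List.nil_append]
      rw [if_neg (by simp; omega)]
      rw [List.drop_replicate, ← List.replicate_succ']
      congr 1
      omega
  · -- L ≤ 1 : every row is empty
    have hd : tokens.drop k = [] := List.drop_eq_nil_of_le (by omega)
    have hd1 : tokens.drop (k + 1) = [] := List.drop_eq_nil_of_le (by omega)
    unfold pvRow
    rw [hd, hd1]
    have h0 : (L - 1) - (L - k) = 0 := by omega
    have h1 : (L - 1) - (L - (k + 1)) = 0 := by omega
    rw [← hL, h0, h1]
    simp

-- B's loop from row k produces rows k, k+1, …, k+n-1.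
lemma msAltLoop_rows (tokens : List Int) : ∀ (n k : Nat), 1 ≤ k →
    msAltLoop n (pvRow tokens k) = (List.range n).map (fun i => pvRow tokens (k + i)) := by
  intro n
  induction n with
  | zero => intro k _; simp [msAltLoop]
  | succ m ih =>
    intro k hk
    rw [msAltLoop, pvRow_step tokens k hk, ih (k + 1) (by omega), List.range_succ_eq_map]
    simp [Function.comp_def, Nat.add_comm, Nat.add_left_comm]

-- A's per-head list for head k (1 ≤ k) is exactly the row pvRow tokens k.toNat.
lemma pvA_elem (tokens : List Int) (k : Int) (hk : 1 ≤ k) :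
    (PySem.List.slice tokens (some k) none).map (some : Int → Option Int) ++
      List.replicate (max (max ((tokens.length : Int) - 1) 0 -
        (((PySem.List.slice tokens (some k) none).map (some : Int → Option Int)).length : Int)) 0).toNat (none : Option Int)
    = pvRow tokens k.toNat := by
  have hk0 : (0 : Int) ≤ k := by omega
  rw [PySem.List.slice_from _ hk0]
  unfold pvRow
  congr 2
  simp only [List.length_map, List.length_drop]
  omega

-- ===== VERDICT =====
theorem make_shifted_targets_spec : Claim_equal_make_shifted_targets := by
  intro tokens max_heads _
  unfold Spec_make_shifted_targets make_shifted_targets make_shifted_targets_alt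
  rw [PySem.List.foldl_append_singleton_eq_map, List.nil_append]
  have hcur : (PySem.List.slice tokens (some 1) none).map (some : Int → Option Int) = pvRow tokens 1 := by
    rw [PySem.List.slice_from _ (by norm_num)]
    unfold pvRow
    simp
  rw [hcur, msAltLoop_rows tokens max_heads.toNat 1 (le_refl 1)]
  rw [PySem.List.pyRange_one]
  have hn : (max_heads + 1 - 1).toNat = max_heads.toNat := by omega
  rw [hn, List.map_map]
  refine List.map_congr_left (fun i hi => ?_)
  simp only [Function.comp_def]
  rw [pvA_elem tokens (1 + (i : Int)) (by omega)]
  congr 1
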